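-- pv_equiv track=rewrite | github.com/chadireoroonu/TIL | problem/01231_4.py | is_id_valid
-- ===== SOURCE A (Python) =====
-- def is_id_valid(user_data):
--     pass
--     # 여기에 코드를 작성합니다.
--     last_data = user_data['id'][-1] # password 값의 마지막 글자를 추출
--     i = 0
--     while i <= 9: # i가 9보다 작거나 같은 동안
--         if str(i) == last_data: # 문자열 i와 마지막 글자를 비교
--             return True # 한번이라도 같은 값이 나오면 True 반환
--         else: # 그렇지 않으면 i를 1 증가시켜 반복
--             i += 1
--     return False # 같은 값이 없다면 False 반환
-- ===== SOURCE B (Python) =====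
-- def is_id_valid(user_data):
--     last_data = user_data['id'][-1]
--     return '0' <= last_data <= '9'
-- ===== Notes on version B (the rewrite author's own statement) =====
-- stated objective: simpler
-- what changed: Replaces the while-loop that enumerates i=0..9 and compares str(i) to the last character with a single closed-form ordinal range test '0' <= last <= '9'.
import Mathlib
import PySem

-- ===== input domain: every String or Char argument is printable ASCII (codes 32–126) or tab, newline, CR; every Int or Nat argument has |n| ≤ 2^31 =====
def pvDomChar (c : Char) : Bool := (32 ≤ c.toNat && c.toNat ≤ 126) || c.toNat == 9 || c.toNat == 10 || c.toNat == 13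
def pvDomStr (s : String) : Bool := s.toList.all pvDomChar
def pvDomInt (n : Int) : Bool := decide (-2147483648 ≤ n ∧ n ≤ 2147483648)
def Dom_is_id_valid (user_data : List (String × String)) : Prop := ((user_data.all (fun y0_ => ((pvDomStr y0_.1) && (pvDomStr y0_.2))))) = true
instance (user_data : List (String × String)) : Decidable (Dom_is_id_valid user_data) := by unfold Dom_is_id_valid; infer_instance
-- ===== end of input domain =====

-- B replaces A's digit-enumeration loop by a closed-form '0' ≤ c ≤ '9' range test (simpler).

-- ===== PORT A =====
-- while i <= 9: if str(i) == last_data: return True else i += 1; return False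
-- (fuel 11 suffices: i starts at 0, and once i = 10 the guard i ≤ 9 fails)
def isIdValidLoop (last_data : String) (i : Int) : Nat → Bool
  | 0 => false
  | fuel + 1 =>
    if i ≤ 9 then
      if PySem.Int.toStr i == last_data then true
      else isIdValidLoop last_data (i + 1) fuel
    else false

def is_id_valid (user_data : List (String × String)) : Bool :=
  match user_data.find? (fun p => p.1 == "id") with
  | none => false          -- KeyError in Python: excluded by Pre_
  | some p =>
    match PySem.Str.pyGet? p.2 (-1) with
    | none => false        -- IndexError in Python: excluded by Pre_
    | some c => isIdValidLoop (String.ofList [c]) 0 11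

-- ===== PORT B =====
def is_id_valid_alt (user_data : List (String × String)) : Bool :=
  match user_data.find? (fun p => p.1 == "id") with
  | none => false          -- KeyError in Python: excluded by Pre_
  | some p =>
    match PySem.Str.pyGet? p.2 (-1) with
    | none => false        -- IndexError in Python: excluded by Pre_
    | some c => decide ('0' ≤ c ∧ c ≤ '9')

-- ===== PRECONDITION & SPEC =====
-- Pre_ excludes inputs where A raises: a missing 'id' key (KeyError) or an empty 'id' value (IndexError).
def Pre_is_id_valid (user_data : List (String × String)) : Prop :=
  ((user_data.find? (fun p => p.1 == "id")).any (fun p => !(p.2 == ""))) = true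
instance (user_data : List (String × String)) : Decidable (Pre_is_id_valid user_data) := by
  unfold Pre_is_id_valid; infer_instance

def pvWitness_is_id_valid : (List (String × String)) := [("id", "chad7"), ("pw", "x")]

def Spec_is_id_valid (user_data : List (String × String)) (out : Bool) : Prop := out = is_id_valid_alt user_data
instance (user_data : List (String × String)) (out : Bool) : Decidable (Spec_is_id_valid user_data out) := by unfold Spec_is_id_valid; infer_instance

-- ===== CLAIM (what is proved, stated in full; the proofs are below) =====
def Claim_equal_is_id_valid : Prop := ∀ (user_data : List (String × String)), Dom_is_id_valid user_data → Pre_is_id_valid user_data → Spec_is_id_valid user_data (is_id_valid user_data)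

-- ===== LEMMAS AND PROOFS =====

theorem char_eq_iff (d c : Char) : (d = c) ↔ d.toNat = c.toNat :=
  ⟨fun h => h ▸ rfl, fun h => Char.ext (UInt32.toNat_inj.mp h)⟩

theorem loop_eq_range (c : Char) :
    isIdValidLoop (String.ofList [c]) 0 11 = decide ('0' ≤ c ∧ c ≤ '9') := by
  have hbeq : ∀ d : Char, (String.ofList [d] == String.ofList [c]) = decide (d.toNat = c.toNat) := by
    intro d; rw [beq_eq_decide]; simp [String.ofList_inj, char_eq_iff]
  have hle1 : ('0' ≤ c) ↔ 48 ≤ c.toNat := by rw [Char.le_def, UInt32.le_iff_toNat_le]; exact Iff.rfl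
  have hle2 : (c ≤ '9') ↔ c.toNat ≤ 57 := by rw [Char.le_def, UInt32.le_iff_toNat_le]; exact Iff.rfl
  have hrhs : decide ('0' ≤ c ∧ c ≤ '9') = decide (48 ≤ c.toNat ∧ c.toNat ≤ 57) := by
    simp only [decide_eq_decide]; exact and_congr hle1 hle2
  rw [hrhs]
  simp only [isIdValidLoop]
  norm_num only
  simp only [
    show PySem.Int.toStr 0 = String.ofList ['0'] from rfl,
    show PySem.Int.toStr 1 = String.ofList ['1'] from rfl,
    show PySem.Int.toStr 2 = String.ofList ['2'] from rfl,
    show PySem.Int.toStr 3 = String.ofList ['3'] from rfl,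
    show PySem.Int.toStr 4 = String.ofList ['4'] from rfl,
    show PySem.Int.toStr 5 = String.ofList ['5'] from rfl,
    show PySem.Int.toStr 6 = String.ofList ['6'] from rfl,
    show PySem.Int.toStr 7 = String.ofList ['7'] from rfl,
    show PySem.Int.toStr 8 = String.ofList ['8'] from rfl,
    show PySem.Int.toStr 9 = String.ofList ['9'] from rfl,
    hbeq]
  simp only [show ('0':Char).toNat = 48 from rfl, show ('1':Char).toNat = 49 from rfl,
    show ('2':Char).toNat = 50 from rfl, show ('3':Char).toNat = 51 from rfl,
    show ('4':Char).toNat = 52 from rfl, show ('5':Char).toNat = 53 from rfl,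
    show ('6':Char).toNat = 54 from rfl, show ('7':Char).toNat = 55 from rfl,
    show ('8':Char).toNat = 56 from rfl, show ('9':Char).toNat = 57 from rfl,
    decide_eq_true_eq]
  simp only [if_true, if_false]
  split_ifs <;>
    first
      | exact (decide_eq_true (by omega)).symm
      | exact (decide_eq_false (by omega)).symm

theorem is_id_valid_spec : Claim_equal_is_id_valid := by
  intro ud _ _
  unfold Spec_is_id_valid is_id_valid is_id_valid_alt
  cases hf : ud.find? (fun p => p.1 == "id") with
  | none => rfl
  | some p =>
    cases hg : PySem.Str.pyGet? p.2 (-1) with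
    | none =>
      show (match PySem.Str.pyGet? p.2 (-1) with
            | none => false
            | some c => isIdValidLoop (String.ofList [c]) 0 11) =
           (match PySem.Str.pyGet? p.2 (-1) with
            | none => false
            | some c => decide ('0' ≤ c ∧ c ≤ '9'))
      rw [hg]
    | some c =>
      show (match PySem.Str.pyGet? p.2 (-1) with
            | none => false
            | some c => isIdValidLoop (String.ofList [c]) 0 11) =
           (match PySem.Str.pyGet? p.2 (-1) with
            | none => false
            | some c => decide ('0' ≤ c ∧ c ≤ '9'))
      rw [hg]
      exact loop_eq_range c
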